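-- pv_equiv track=rewrite | github.com/fermarcosmac/DDSP-adaptive-EQ-26 | src/utils/metrics.py | parse_optimizer_from_stem
-- ===== SOURCE A (Python) =====
-- def safe_token(text: str) -> str:
--     """Normalize a token so it can be matched against filename fragments."""
--     return str(text).replace("-", "_").replace(" ", "_")
--
-- def parse_optimizer_from_stem(parts: list[str], known_optimizers: list[str]) -> str:
--     """Infer optimizer name from an ``EQ_*.wav`` filename split into tokens."""
--     post_eq_parts = parts[1:]
--     candidate_tokens = sorted(
--         [(safe_token(opt).split("_"), opt) for opt in known_optimizers],
--         key=lambda item: len(item[0]),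
--         reverse=True,
--     )
--
--     for opt_tokens, opt_display in candidate_tokens:
--         if post_eq_parts[: len(opt_tokens)] == opt_tokens:
--             return opt_display
--
--     if post_eq_parts:
--         return post_eq_parts[0]
--     return "unknown"
-- ===== SOURCE B (Python) =====
-- def safe_token(text: str) -> str:
--     """Normalize a token so it can be matched against filename fragments."""
--     return str(text).replace("-", "_").replace(" ", "_")
--
-- def parse_optimizer_from_stem(parts: list[str], known_optimizers: list[str]) -> str:
--     """Infer optimizer name from an ``EQ_*.wav`` filename split into tokens."""
--     post_eq_parts = parts[1:]
--     best_len = -1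
--     best_display = None
--     for opt in known_optimizers:
--         opt_tokens = safe_token(opt).split("_")
--         if post_eq_parts[:len(opt_tokens)] == opt_tokens and len(opt_tokens) > best_len:
--             best_len = len(opt_tokens)
--             best_display = opt
--     if best_len >= 0:
--         return best_display
--     return post_eq_parts[0] if post_eq_parts else "unknown"
-- ===== Notes on version B (the rewrite author's own statement) =====
-- stated objective: simpler
-- what changed: Replaces the build-list/stable-reverse-sort/scan pipeline with a single pass over known_optimizers keeping the running best match (strict > preserves A's longest-first, earliest-on-ties choice), eliminating the intermediate list and the sort.
import Mathlib
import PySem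

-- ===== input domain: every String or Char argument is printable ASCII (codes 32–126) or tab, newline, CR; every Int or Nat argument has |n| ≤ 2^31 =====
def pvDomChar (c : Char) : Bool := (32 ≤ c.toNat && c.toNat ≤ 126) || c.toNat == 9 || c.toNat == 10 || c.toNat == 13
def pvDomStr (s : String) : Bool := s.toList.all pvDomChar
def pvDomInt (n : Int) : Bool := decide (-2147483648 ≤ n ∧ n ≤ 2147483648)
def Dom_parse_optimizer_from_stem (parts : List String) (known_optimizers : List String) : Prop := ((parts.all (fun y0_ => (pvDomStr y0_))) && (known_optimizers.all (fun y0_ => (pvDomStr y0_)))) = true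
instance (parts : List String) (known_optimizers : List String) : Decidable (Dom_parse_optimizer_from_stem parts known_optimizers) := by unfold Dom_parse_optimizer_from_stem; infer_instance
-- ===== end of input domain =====

-- B replaces A's build-list / stable-reverse-sort / first-match scan by a single running-best
-- pass over known_optimizers (strict > keeps A's longest-first, earliest-on-ties choice): simpler, no sort.

set_option maxHeartbeats 1600000


-- ===== PORT A =====
-- safe_token (module helper used by both Pythons)
def pvSafeToken (text : String) : String :=
  PySem.Str.replace (PySem.Str.replace text "-" "_") " " "_"

-- safe_token(opt).split("_"); the separator "_" is non-empty, so split? is always `some` (getD unreachable)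
def pvToks (opt : String) : List String :=
  (PySem.Str.split? (pvSafeToken opt) "_").getD []

-- A's for-loop over candidate_tokens with the post-loop fallback
def pvLoopA (post : List String) : List (List String × String) → String
  | [] => match post with
          | [] => "unknown"
          | p :: _ => p
  | (toks, disp) :: rest =>
      if post.take toks.length = toks then disp else pvLoopA post rest

def parse_optimizer_from_stem (parts : List String) (known_optimizers : List String) : String :=
  let post_eq_parts := PySem.List.slice parts (some 1) none
  let candidate_tokens :=
    PySem.List.sorted (known_optimizers.map (fun opt => (pvToks opt, opt)))
      (fun item => item.1.length) true
  pvLoopA post_eq_parts candidate_tokens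

-- ===== PORT B =====
-- B's loop body: update (best_len, best_display) on a strictly longer prefix match
def pvStepB (post : List String) (st : Int × Option String) (opt : String) : Int × Option String :=
  let toks := pvToks opt
  if post.take toks.length = toks ∧ (toks.length : Int) > st.1 then
    ((toks.length : Int), some opt)
  else st

def parse_optimizer_from_stem_alt (parts : List String) (known_optimizers : List String) : String :=
  let post_eq_parts := PySem.List.slice parts (some 1) none
  let st := known_optimizers.foldl (pvStepB post_eq_parts) (-1, none)
  if 0 ≤ st.1 then st.2.getD "unknown"  -- best_len ≥ 0 forces best_display = some _; the getD arm is unreachable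
  else match post_eq_parts with
       | [] => "unknown"
       | p :: _ => p

-- ===== PRECONDITION & SPEC =====
def Spec_parse_optimizer_from_stem (parts : List String) (known_optimizers : List String) (out : String) : Prop := out = parse_optimizer_from_stem_alt parts known_optimizers
instance (parts : List String) (known_optimizers : List String) (out : String) : Decidable (Spec_parse_optimizer_from_stem parts known_optimizers out) := by unfold Spec_parse_optimizer_from_stem; infer_instance

-- ===== CLAIM (what is proved, stated in full; the proofs are below) =====
def Claim_equal_parse_optimizer_from_stem : Prop := ∀ (parts : List String) (known_optimizers : List String), Dom_parse_optimizer_from_stem parts known_optimizers → Spec_parse_optimizer_from_stem parts known_optimizers (parse_optimizer_from_stem parts known_optimizers)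

-- ===== LEMMAS AND PROOFS =====

-- the first matching (tokens, display) pair of a candidate list; used only in the proofs
def pvScanP (post : List String) : List (List String × String) → Option (List String × String)
  | [] => none
  | (toks, disp) :: rest =>
      if post.take toks.length = toks then some (toks, disp) else pvScanP post rest

theorem pvLoopA_eq_scanP (post : List String) (cs : List (List String × String)) :
    pvLoopA post cs =
      match pvScanP post cs with
      | some (_, d) => d
      | none => match post with
                | [] => "unknown"
                | p :: _ => p := by
  induction cs with
  | nil => rfl
  | cons c rest ih =>
    obtain ⟨toks, disp⟩ := c
    simp only [pvLoopA, pvScanP]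
    split_ifs with h <;> simp [ih]

theorem pvInsertBy_nil {α : Type} (b : α → α → Bool) (x : α) :
    PySem.List.insertBy b x [] = [x] := rfl

theorem pvInsertBy_cons {α : Type} (b : α → α → Bool) (x y : α) (ys : List α) :
    PySem.List.insertBy b x (y :: ys) =
      if b x y then x :: y :: ys else y :: PySem.List.insertBy b x ys := rfl

-- descending-by-token-length order
def pvDesc (a b : List String × String) : Prop := b.1.length ≤ a.1.length

theorem pvInsertBy_pairwise (x : List String × String) (acc : List (List String × String))
    (h : acc.Pairwise pvDesc) :
    (PySem.List.insertBy (fun a b => decide (b.1.length < a.1.length)) x acc).Pairwise pvDesc := by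
  induction acc with
  | nil => simp [pvInsertBy_nil, pvDesc]
  | cons y ys ih =>
    rw [List.pairwise_cons] at h
    rw [pvInsertBy_cons]
    split_ifs with hb
    · replace hb := of_decide_eq_true hb
      refine List.Pairwise.cons ?_ (List.Pairwise.cons h.1 h.2)
      intro z hz
      rcases List.mem_cons.1 hz with rfl | hz
      · exact le_of_lt hb
      · exact le_trans (h.1 z hz) (le_of_lt hb)
    · replace hb := Nat.le_of_not_lt (fun h => hb (decide_eq_true h))
      refine List.Pairwise.cons ?_ (ih h.2)
      intro z hz
      rcases (PySem.List.mem_insertBy _ x z ys).1 hz with rfl | hz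
      · exact hb
      · exact h.1 z hz

-- the invariant tying B's running best to A's first match in the sorted accumulator
def pvInv (post : List String) (acc : List (List String × String)) (st : Int × Option String) : Prop :=
  acc.Pairwise pvDesc ∧
    ((st = (-1, none) ∧ pvScanP post acc = none) ∨
     (∃ toks disp, pvScanP post acc = some (toks, disp) ∧ st = ((toks.length : Int), some disp)))

-- a first match is a member of the list
theorem pvScanP_mem (post : List String) (cs : List (List String × String))
    (toks : List String) (disp : String) (h : pvScanP post cs = some (toks, disp)) :
    (toks, disp) ∈ cs := by
  induction cs with
  | nil => simp [pvScanP] at h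
  | cons c rest ih =>
    obtain ⟨ct, cd⟩ := c
    simp only [pvScanP] at h
    split_ifs at h with hc
    · obtain ⟨rfl, rfl⟩ := Prod.mk.inj (Option.some.inj h)
      exact List.mem_cons_self
    · exact List.mem_cons_of_mem _ (ih h)

theorem pvInv_insert (post : List String) (acc : List (List String × String))
    (st : Int × Option String) (xt : List String) (xd : String) (h : pvInv post acc st) :
    pvInv post (PySem.List.insertBy (fun a b => decide (b.1.length < a.1.length)) (xt, xd) acc)
      (if post.take xt.length = xt ∧ (xt.length : Int) > st.1 then
        ((xt.length : Int), some xd) else st) := by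
  obtain ⟨hpw, hrel⟩ := h
  induction acc generalizing st with
  | nil =>
    rcases hrel with ⟨rfl, -⟩ | ⟨toks, disp, hscan, -⟩
    · rw [pvInsertBy_nil]
      refine ⟨by simp [pvDesc], ?_⟩
      by_cases hm : post.take xt.length = xt
      · right
        refine ⟨xt, xd, by rw [pvScanP, if_pos hm], ?_⟩
        rw [if_pos ⟨hm, by omega⟩]
      · left
        refine ⟨?_, by rw [pvScanP, if_neg hm, pvScanP]⟩
        rw [if_neg (fun hc => hm hc.1)]
    · rw [pvScanP] at hscan
      cases hscan
  | cons y ys ih =>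
    obtain ⟨ytoks, ydisp⟩ := y
    rw [List.pairwise_cons] at hpw
    rw [pvInsertBy_cons]
    split_ifs with hb hc hc
    -- hb : does (xt, xd) go in front?   hc : does B's update fire?
    all_goals first
    | (-- hb true: new pair in front; pairwise part shared by the two hc cases
       refine ⟨?_, ?_⟩
       · replace hb : ytoks.length < xt.length := of_decide_eq_true hb
         refine List.Pairwise.cons ?_ (List.Pairwise.cons hpw.1 hpw.2)
         intro z hz
         rcases List.mem_cons.1 hz with rfl | hz
         · exact le_of_lt hb
         · exact le_trans (hpw.1 z hz) (le_of_lt hb)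
       · first
         | (-- hc true: B records the new match; it is also A's new first match
            right
            exact ⟨xt, xd, by rw [pvScanP, if_pos hc.1], rfl⟩)
         | (-- hc false: since everything below is strictly shorter, st.1 < xt.length,
            -- so ¬hc means the new pair does not match: scan and state unchanged
            replace hb : ytoks.length < xt.length := of_decide_eq_true hb
            have hm : ¬ post.take xt.length = xt := by
              intro hm
              apply hc
              refine ⟨hm, ?_⟩
              rcases hrel with ⟨rfl, -⟩ | ⟨toks, disp, hscan, rfl⟩
              · show (-1 : Int) < ((xt.length : Nat) : Int)
                omega
              · show ((toks.length : Nat) : Int) < ((xt.length : Nat) : Int)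
                have hmem := pvScanP_mem post _ _ _ hscan
                have hle : toks.length ≤ ytoks.length := by
                  rcases List.mem_cons.1 hmem with heq | hmem'
                  · obtain ⟨rfl, rfl⟩ := Prod.mk.inj heq; exact le_refl _
                  · exact hpw.1 _ hmem'
                omega
            rw [pvScanP, if_neg hm]
            exact hrel))
    | skip
    -- remaining: hb false (y stays in front), with hc true or false
    all_goals replace hb : xt.length ≤ ytoks.length :=
      Nat.le_of_not_lt (fun hlt => hb (decide_eq_true hlt))
    · -- hb false, hc true: impossible when y matches; y not matching passes the invariant down
      by_cases hy : post.take ytoks.length = ytoks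
      · exfalso
        rcases hrel with ⟨-, hscan⟩ | ⟨toks, disp, hscan, rfl⟩
        · rw [pvScanP, if_pos hy] at hscan
          cases hscan
        · rw [pvScanP, if_pos hy] at hscan
          obtain ⟨rfl, rfl⟩ := Prod.mk.inj (Option.some.inj hscan)
          have hgt : ((ytoks.length : Nat) : Int) < ((xt.length : Nat) : Int) := hc.2
          omega
      · have hrel' : (st = (-1, none) ∧ pvScanP post ys = none) ∨
            (∃ toks disp, pvScanP post ys = some (toks, disp) ∧
              st = ((toks.length : Int), some disp)) := by
          rw [pvScanP, if_neg hy] at hrel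
          exact hrel
        obtain ⟨hpw', hrel''⟩ := ih st hpw.2 hrel'
        rw [if_pos hc] at hrel''
        refine ⟨?_, ?_⟩
        · refine List.Pairwise.cons ?_ hpw'
          intro z hz
          rcases (PySem.List.mem_insertBy _ _ z ys).1 hz with rfl | hz
          · exact hb
          · exact hpw.1 z hz
        · rw [pvScanP, if_neg hy]
          exact hrel''
    · -- hb false, hc false: state unchanged; scan of the new list is the old scan
      have hpairw : (((ytoks, ydisp) ::
          PySem.List.insertBy (fun a b => decide (b.1.length < a.1.length)) (xt, xd) ys) :
            List (List String × String)).Pairwise pvDesc := by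
        refine List.Pairwise.cons ?_ (pvInsertBy_pairwise _ _ hpw.2)
        intro z hz
        rcases (PySem.List.mem_insertBy _ _ z ys).1 hz with rfl | hz
        · exact hb
        · exact hpw.1 z hz
      by_cases hy : post.take ytoks.length = ytoks
      · -- y is the first match, unchanged
        rcases hrel with ⟨-, hscan⟩ | ⟨toks, disp, hscan, rfl⟩
        · rw [pvScanP, if_pos hy] at hscan
          cases hscan
        · rw [pvScanP, if_pos hy] at hscan
          obtain ⟨rfl, rfl⟩ := Prod.mk.inj (Option.some.inj hscan)
          exact ⟨hpairw, Or.inr ⟨ytoks, ydisp, by rw [pvScanP, if_pos hy], rfl⟩⟩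
      · -- y does not match: the invariant passes down to ys
        have hrel' : (st = (-1, none) ∧ pvScanP post ys = none) ∨
            (∃ toks disp, pvScanP post ys = some (toks, disp) ∧
              st = ((toks.length : Int), some disp)) := by
          rw [pvScanP, if_neg hy] at hrel
          exact hrel
        obtain ⟨-, hrel''⟩ := ih st hpw.2 hrel'
        rw [if_neg hc] at hrel''
        refine ⟨hpairw, ?_⟩
        rw [pvScanP, if_neg hy]
        exact hrel''

-- pvStepB is exactly the update of pvInv_insert at (pvToks opt, opt)
theorem pvInv_step (post : List String) (acc : List (List String × String))
    (st : Int × Option String) (opt : String) (h : pvInv post acc st) :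
    pvInv post (PySem.List.insertBy (fun a b => decide (b.1.length < a.1.length)) (pvToks opt, opt) acc)
      (pvStepB post st opt) :=
  pvInv_insert post acc st (pvToks opt) opt h

theorem pvInv_foldl (post : List String) (known : List String) :
    pvInv post
      (known.foldl (fun acc opt =>
        PySem.List.insertBy (fun a b => decide (b.1.length < a.1.length)) (pvToks opt, opt) acc) [])
      (known.foldl (pvStepB post) (-1, none)) := by
  suffices h : ∀ (acc : List (List String × String)) (st : Int × Option String),
      pvInv post acc st →
      pvInv post
        (known.foldl (fun acc opt =>
          PySem.List.insertBy (fun a b => decide (b.1.length < a.1.length)) (pvToks opt, opt) acc) acc)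
        (known.foldl (pvStepB post) st) by
    exact h [] (-1, none) ⟨List.Pairwise.nil, Or.inl ⟨rfl, by rw [pvScanP]⟩⟩
  induction known with
  | nil => intro acc st h; exact h
  | cons o os ih =>
    intro acc st h
    rw [List.foldl_cons, List.foldl_cons]
    exact ih _ _ (pvInv_step post acc st o h)

-- the sorted candidate list IS the insertBy fold, in B's element order
theorem pvSorted_eq_fold (known : List String) :
    PySem.List.sorted (known.map (fun opt => (pvToks opt, opt))) (fun item => item.1.length) true =
      known.foldl (fun acc opt =>
        PySem.List.insertBy (fun a b => decide (b.1.length < a.1.length)) (pvToks opt, opt) acc) [] := by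
  rw [PySem.List.sorted_rev_eq_foldl_insertBy, List.foldl_map]

-- ===== VERDICT (by name: the statement is the Claim_ definition above) =====
theorem parse_optimizer_from_stem_spec : Claim_equal_parse_optimizer_from_stem := by
  intro parts known _
  unfold Spec_parse_optimizer_from_stem parse_optimizer_from_stem parse_optimizer_from_stem_alt
  simp only [pvLoopA_eq_scanP, pvSorted_eq_fold]
  obtain ⟨-, hrel⟩ := pvInv_foldl (PySem.List.slice parts (some 1) none) known
  rcases hrel with ⟨hst, hscan⟩ | ⟨toks, disp, hscan, hst⟩
  · rw [hscan, hst]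
    rw [if_neg (by norm_num)]
  · rw [hscan, hst]
    rw [if_pos (show (0 : Int) ≤ ((toks.length : Nat) : Int) by omega)]
    rfl
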